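-- pv_equiv track=rewrite | github.com/PentaniaGameStudio/Azurion | Potion Tool Database/application/use_cases.py | _generate_copy_name
-- ===== SOURCE A (Python) =====
-- def _generate_copy_name(base: str, existing: set[str]) -> str:
--     """
--     Produit un nom unique à partir de base.
--     Stratégie: "base (copie)" puis "base (copie 2)", "base (copie 3)", ...
--     """
--     if base not in existing:
--         return base
--     n = 2
--     candidate = f"{base} (copie)"
--     if candidate not in existing:
--         return candidate
--     while True:
--         candidate = f"{base} (copie {n})"
--         if candidate not in existing:
--             return candidate
--         n += 1
-- ===== SOURCE B (Python) =====
-- def _generate_copy_name(base: str, existing: set[str]) -> str: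
--     """
--     Produit un nom unique a partir de base.
--     Au lieu de sonder les candidats un par un, on construit la table des
--     "slots" candidats (base, "base (copie)", "base (copie i)" pour
--     i = 2..len(existing)+2 -- il y a plus de slots que de noms, donc l'un
--     est forcement libre), on indexe les slots par nom, puis UN SEUL passage
--     sur existing marque les slots occupes; on renvoie le premier slot libre.
--     """
--     slots = [base, f"{base} (copie)"] + [f"{base} (copie {i})" for i in range(2, len(existing) + 3)]
--     index = {name: i for i, name in enumerate(slots)}
--     taken = [False] * len(slots)
--     for name in existing:
--         i = index.get(name)
--         if i is not None:
--             taken[i] = True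
--     return slots[taken.index(False)]
-- ===== Notes on version B (the rewrite author's own statement) =====
-- stated objective: alternative
-- what changed: A probes candidate names one by one against the set until a free one is found; B instead builds the whole candidate slot table up front (len(existing)+3 slots always suffice), indexes the slots by name in a dict, marks the taken slots in a single pass over existing, and returns the first unmarked slot -- trading A's lazy probing (usually 1-2 probes) for one eager table-building and marking pass, so B does more work when A would stop early.
import Mathlib
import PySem

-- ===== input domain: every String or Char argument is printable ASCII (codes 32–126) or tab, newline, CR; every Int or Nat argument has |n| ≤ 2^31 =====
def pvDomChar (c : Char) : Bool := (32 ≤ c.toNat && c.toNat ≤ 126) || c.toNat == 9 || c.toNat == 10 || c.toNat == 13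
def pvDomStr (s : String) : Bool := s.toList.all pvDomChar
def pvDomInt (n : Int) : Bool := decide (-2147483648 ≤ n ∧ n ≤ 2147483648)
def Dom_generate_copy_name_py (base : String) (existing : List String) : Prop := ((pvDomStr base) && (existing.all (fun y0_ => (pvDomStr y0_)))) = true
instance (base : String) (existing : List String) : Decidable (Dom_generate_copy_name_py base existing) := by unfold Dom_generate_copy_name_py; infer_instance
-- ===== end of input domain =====

-- B replaces A's probe loop (try each candidate against the set) by a slot table: it builds the
-- candidate slots once, indexes them by name in a dict, marks taken slots in ONE pass over
-- existing, and returns the first free slot (objective: alternative).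
-- Equivalence is about the RETURN value; neither program mutates its arguments.

-- ===== PORT A =====
-- f"{base} (copie)"
def copieTag (base : String) : String := base ++ " (copie)"
-- f"{base} (copie {n})"
def copieNum (base : String) (n : Int) : String := base ++ " (copie " ++ PySem.Int.toStr n ++ ")"

-- A's 'while True' loop: candidate = f"{base} (copie {n})"; return if free, else n += 1.
-- Fuel existing.length + 1 suffices behaviourally (the numbered candidates are pairwise
-- distinct strings, so one of the first length+1 lies outside existing); "" at fuel 0.
def copyLoopA (base : String) (existing : List String) : Nat → Int → String
  | 0, _ => ""
  | fuel + 1, n =>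
    let candidate := copieNum base n
    if existing.contains candidate then copyLoopA base existing fuel (n + 1) else candidate

def generate_copy_name_py (base : String) (existing : List String) : String :=
  if existing.contains base = false then base
  else
    let candidate := copieTag base
    if existing.contains candidate = false then candidate
    else copyLoopA base existing (existing.length + 1) 2

-- ===== PORT B =====
-- Source B: slots = [base, f"{base} (copie)"] + [f"{base} (copie {i})" for i in range(2, len(existing)+3)]
--       index = {name: i for i, name in enumerate(slots)}; taken = [False]*len(slots)
--       for name in existing: i = index.get(name); if i is not None: taken[i] = True
--       return slots[taken.index(False)]
-- taken.index(False) cannot raise (the slots outnumber existing), so the 'none' arm is unreachable.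
def generate_copy_name_py_alt (base : String) (existing : List String) : String :=
  let slots : List String :=
    base :: copieTag base ::
      (PySem.List.pyRange 2 ((existing.length : Int) + 3) 1).map (fun i => copieNum base i)
  let index : PySem.Dict String Int :=
    (PySem.List.enumerate slots).foldl (fun d p => d.insert p.2 p.1) PySem.Dict.empty
  let taken : List Bool :=
    existing.foldl (fun t name =>
      match index.get? name with
      | some i => PySem.List.pySetD t i true
      | none => t) (List.replicate slots.length false)
  match PySem.List.index? taken false with
  | some i => PySem.List.pyGetD slots (i : Int) ""
  | none => ""

-- ===== PRECONDITION & SPEC =====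
def Spec_generate_copy_name_py (base : String) (existing : List String) (out : String) : Prop := out = generate_copy_name_py_alt base existing
instance (base : String) (existing : List String) (out : String) : Decidable (Spec_generate_copy_name_py base existing out) := by unfold Spec_generate_copy_name_py; infer_instance

-- ===== CLAIM (what is proved, stated in full; the proofs are below) =====
def Claim_equal_generate_copy_name_py : Prop := ∀ (base : String) (existing : List String), Dom_generate_copy_name_py base existing → Spec_generate_copy_name_py base existing (generate_copy_name_py base existing)

-- ===== LEMMAS AND PROOFS =====

def slotsL (base : String) (m : Nat) : List String :=
  base :: copieTag base :: (List.range (m + 1)).map (fun i : Nat => copieNum base (2 + (i : Int)))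

theorem findD_cons (existing : List String) (c : String) (l : List String) :
    ((c :: l).find? (fun x => !(existing.contains x))).getD "" =
      if existing.contains c = true
      then (l.find? (fun x => !(existing.contains x))).getD "" else c := by
  cases hx : existing.contains c
  · rw [List.find?_cons_of_pos (by rw [hx]; rfl), Option.getD_some, if_neg (by decide)]
  · rw [List.find?_cons_of_neg (by rw [hx]; simp), if_pos rfl]

theorem copyLoopA_eq_find (base : String) (existing : List String) :
    ∀ (fuel : Nat) (n : Int),
      copyLoopA base existing fuel n =
        (((List.range fuel).map (fun i : Nat => copieNum base (n + (i : Int)))).find?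
          (fun c => !(existing.contains c))).getD "" := by
  intro fuel
  induction fuel with
  | zero => intro n; rfl
  | succ f ih =>
    intro n
    rw [List.range_succ_eq_map, List.map_cons, List.map_map, findD_cons]
    simp only [Nat.cast_zero, add_zero]
    show (if existing.contains (copieNum base n) = true
          then copyLoopA base existing f (n + 1) else copieNum base n) = _
    have hmap : ((fun i : Nat => copieNum base (n + (i : Int))) ∘ Nat.succ)
              = fun i : Nat => copieNum base ((n + 1) + (i : Int)) := by
      funext i
      simp only [Function.comp_apply, Nat.succ_eq_add_one]
      congr 1
      push_cast
      ring
    cases hx : existing.contains (copieNum base n)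
    · rw [if_neg (by decide), if_neg (by decide)]
    · rw [if_pos rfl, if_pos rfl, hmap, ih (n + 1)]

theorem A_eq_findD (base : String) (existing : List String) :
    generate_copy_name_py base existing =
      ((slotsL base existing.length).find? (fun c => !(existing.contains c))).getD "" := by
  unfold generate_copy_name_py slotsL
  rw [findD_cons, findD_cons]
  cases hb : existing.contains base
  · rw [if_pos rfl, if_neg (by decide)]
  · rw [if_neg (by decide), if_pos rfl]
    show (if existing.contains (copieTag base) = false then copieTag base
          else copyLoopA base existing (existing.length + 1) 2) = _
    cases hc : existing.contains (copieTag base)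
    · rw [if_pos rfl, if_neg (by decide)]
    · rw [if_neg (by decide), if_pos rfl, copyLoopA_eq_find]

theorem pyRange_two (m : Nat) :
    PySem.List.pyRange 2 ((m : Int) + 3) 1 = (List.range (m + 1)).map (fun i : Nat => (2 : Int) + i) := by
  have h1 : (((m : Int) + 3 - 2)).toNat = m + 1 := by omega
  have h2 : (2:Int) < (m:Int) + 3 := by omega
  simp [PySem.List.pyRange, h1, h2]

theorem toDigitsCore_append (f : Nat) : ∀ (n : Nat) (l : List Char),
    Nat.toDigitsCore 10 f n l = Nat.toDigitsCore 10 f n [] ++ l := by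
  induction f with
  | zero => intro n l; simp [Nat.toDigitsCore]
  | succ f ih =>
    intro n l
    simp only [Nat.toDigitsCore]
    by_cases h : n / 10 = 0
    · simp [h]
    · simp only [h, if_false]
      rw [ih (n/10) [Nat.digitChar (n % 10)], ih (n/10) (Nat.digitChar (n % 10) :: l)]
      simp

def charsVal (cs : List Char) : Nat := cs.foldl (fun a c => a * 10 + (c.toNat - 48)) 0

theorem digitChar_toNat (k : Nat) (h : k < 10) : (Nat.digitChar k).toNat = 48 + k := by
  interval_cases k <;> decide

theorem charsVal_append_singleton (cs : List Char) (c : Char) :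
    charsVal (cs ++ [c]) = charsVal cs * 10 + (c.toNat - 48) := by
  simp [charsVal, List.foldl_append]

theorem charsVal_toDigitsCore (f : Nat) : ∀ n : Nat, n < f → charsVal (Nat.toDigitsCore 10 f n []) = n := by
  induction f with
  | zero => omega
  | succ f ih =>
    intro n hn
    simp only [Nat.toDigitsCore]
    by_cases h : n / 10 = 0
    · have hn10 : n < 10 := by omega
      simp [h, charsVal, digitChar_toNat (n % 10) (by omega)]
      omega
    · simp only [h, if_false]
      rw [toDigitsCore_append, charsVal_append_singleton, ih (n/10) (by omega),
        digitChar_toNat (n % 10) (by omega)]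
      omega

theorem charsVal_toDigits (n : Nat) : charsVal (Nat.toDigits 10 n) = n :=
  charsVal_toDigitsCore (n+1) n (by omega)



theorem toChars_inj {a b : Int} (ha : 0 ≤ a) (hb : 0 ≤ b)
    (h : PySem.Int.toChars a = PySem.Int.toChars b) : a = b := by
  simp only [PySem.Int.toChars, if_neg (by omega : ¬ a < 0), if_neg (by omega : ¬ b < 0)] at h
  have := congrArg charsVal h
  rw [charsVal_toDigits, charsVal_toDigits] at this
  omega

theorem toDigitsCore_ne_nil (f n : Nat) : Nat.toDigitsCore 10 (f+1) n [] ≠ [] := by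
  simp only [Nat.toDigitsCore]
  by_cases h : n / 10 = 0
  · simp [h]
  · simp only [h, if_false]
    rw [toDigitsCore_append]
    simp

theorem toChars_ne_nil (n : Int) : PySem.Int.toChars n ≠ [] := by
  simp only [PySem.Int.toChars]
  by_cases h : n < 0
  · simp [h]
  · simp only [h, if_false]
    exact toDigitsCore_ne_nil _ _

theorem copieTag_toList (base : String) :
    (copieTag base).toList = base.toList ++ (" (copie)").toList := by
  simp [copieTag]

theorem copieNum_toList (base : String) (n : Int) :
    (copieNum base n).toList = base.toList ++ (" (copie ").toList ++ PySem.Int.toChars n ++ [')'] := by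
  simp [copieNum, PySem.Int.toList_toStr]

theorem len_copieNum (base : String) (n : Int) :
    (copieNum base n).toList.length = base.toList.length + 9 + (PySem.Int.toChars n).length := by
  rw [copieNum_toList]; simp; omega

theorem copieNum_inj (base : String) {a b : Int} (ha : 0 ≤ a) (hb : 0 ≤ b)
    (h : copieNum base a = copieNum base b) : a = b := by
  have h1 := congrArg String.toList h
  rw [copieNum_toList, copieNum_toList] at h1
  rw [List.append_assoc, List.append_assoc, List.append_assoc, List.append_assoc] at h1
  have h2 := List.append_cancel_left (List.append_cancel_left h1)
  exact toChars_inj ha hb (List.append_cancel_right h2)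

theorem base_ne_copieTag (base : String) : base ≠ copieTag base := by
  intro h
  have this : base.toList.length = (copieTag base).toList.length := by rw [← h]
  rw [copieTag_toList] at this
  simp at this

theorem base_ne_copieNum (base : String) (n : Int) : base ≠ copieNum base n := by
  intro h
  have this : base.toList.length = (copieNum base n).toList.length := by rw [← h]
  rw [len_copieNum] at this
  omega

theorem copieTag_ne_copieNum (base : String) (n : Int) : copieTag base ≠ copieNum base n := by
  intro h
  have this : (copieTag base).toList.length = (copieNum base n).toList.length := by rw [← h]
  rw [copieTag_toList, len_copieNum] at this
  simp at this
  have h1 : PySem.Int.toChars n ≠ [] := toChars_ne_nil n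
  have h2 : 1 ≤ (PySem.Int.toChars n).length := List.length_pos_iff.mpr h1
  omega

theorem slotsL_nodup (base : String) (m : Nat) : (slotsL base m).Nodup := by
  unfold slotsL
  refine List.Nodup.cons ?_ (List.Nodup.cons ?_ ?_)
  · intro hmem
    rcases List.mem_cons.mp hmem with h | h
    · exact base_ne_copieTag base h
    · rcases List.mem_map.mp h with ⟨i, _, hi⟩
      exact base_ne_copieNum base _ hi.symm
  · intro hmem
    rcases List.mem_map.mp hmem with ⟨i, _, hi⟩
    exact copieTag_ne_copieNum base _ hi.symm
  · refine List.Nodup.map_on ?_ (List.nodup_range)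
    intro i _ j _ hij
    have := copieNum_inj base (by omega : (0:Int) ≤ 2 + (i:Int)) (by omega : (0:Int) ≤ 2 + (j:Int)) hij
    omega

theorem get_build (l : List String) (hl : l.Nodup) :
    ∀ (s : Int) (d : PySem.Dict String Int) (name : String),
      ((PySem.List.enumerate l s).foldl (fun d p => d.insert p.2 p.1) d).get? name
        = match List.idxOf? name l with
          | some k => some (s + (k : Int))
          | none => d.get? name := by
  induction l with
  | nil => intro s d name; simp [PySem.List.enumerate, List.idxOf?]
  | cons x t ih =>
    intro s d name
    have hx : x ∉ t := (List.nodup_cons.mp hl).1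
    have ht : t.Nodup := (List.nodup_cons.mp hl).2
    have henum : PySem.List.enumerate (x :: t) s = (s, x) :: PySem.List.enumerate t (s + 1) := by
      simp [PySem.List.enumerate]
    rw [henum, List.foldl_cons, ih ht (s + 1) _ name, List.idxOf?_cons]
    by_cases hxy : x = name
    · subst hxy
      have : List.idxOf? x t = none := List.idxOf?_eq_none_iff.mpr (by simp [hx])
      simp [this, PySem.Dict.get?_insert_self]
    · have hbeq : (x == name) = false := by simp [hxy]
      rw [hbeq]
      simp only [Bool.false_eq_true, if_false]
      cases hidx : List.idxOf? name t with
      | some k => simp; omega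
      | none => simp [PySem.Dict.get?_insert_of_ne d s (fun h => hxy h.symm)]

theorem pySetD_natCast {α : Type} (xs : List α) (k : Nat) (v : α) (hk : k < xs.length) :
    PySem.List.pySetD xs ((k : Nat) : Int) v = xs.set k v := by
  simp [PySem.List.pySetD, PySem.List.pySet?, PySem.List.pyIdx?, hk]

theorem mark_fold (sl : List String) (hsl : sl.Nodup)
    (index : PySem.Dict String Int)
    (hidx : ∀ name, index.get? name
      = match List.idxOf? name sl with
        | some k => some ((k : Int))
        | none => none) :
    ∀ (es : List String) (t0 : List Bool), t0.length = sl.length →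
      es.foldl (fun t name =>
          match index.get? name with
          | some i => PySem.List.pySetD t i true
          | none => t) t0
        = (List.range sl.length).map
            (fun j => t0.getD j false || es.contains (sl.getD j "")) := by
  intro es
  induction es with
  | nil =>
    intro t0 hlen
    simp only [List.foldl_nil, List.contains_eq_mem]
    refine List.ext_getElem (by simp [hlen]) ?_
    intro j h1 h2
    simp only [List.getElem_map, List.getElem_range]
    have hj : j < sl.length := by simpa using h2
    simp [List.getD_eq_getElem?_getD, List.getElem?_eq_getElem (hlen ▸ hj)]
  | cons name rest ih =>
    intro t0 hlen
    rw [List.foldl_cons, hidx name]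
    cases hio : List.idxOf? name sl with
    | some k =>
      obtain ⟨hk, hke, _⟩ := List.idxOf?_eq_some_iff.mp hio
      have hstep : (match some ((k : Int)) with
          | some i => PySem.List.pySetD t0 i true
          | none => t0) = t0.set k true := by
        exact pySetD_natCast t0 k true (hlen ▸ hk)
      rw [hstep, ih (t0.set k true) (by simp [hlen])]
      refine List.map_congr_left ?_
      intro j hj
      have hjlt : j < sl.length := List.mem_range.mp hj
      have hEl : sl.getD j "" = sl[j] := by
        simp [List.getD_eq_getElem?_getD, List.getElem?_eq_getElem hjlt]
      have hgd : (t0.set k true).getD j false = if k = j then true else t0.getD j false := by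
        simp only [List.getD_eq_getElem?_getD, List.getElem?_set]
        by_cases h : k = j
        · subst h
          rw [if_pos rfl, if_pos (by omega : k < t0.length)]
          simp
        · simp [h]
      rw [hgd, hEl, List.contains_cons]
      by_cases hkj : k = j
      · subst hkj
        simp [hke]
      · have hne : (sl[j] == name) = false := by
          refine beq_eq_false_iff_ne.mpr ?_
          intro hc
          exact hkj (((List.Nodup.getElem_inj_iff hsl).mp (hke ▸ hc)).symm)
        simp [hkj, hne]
    | none =>
      have hnm : name ∉ sl := by simpa using List.idxOf?_eq_none_iff.mp hio
      rw [show (match (none : Option Int) with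
          | some i => PySem.List.pySetD t0 i true
          | none => t0) = t0 from rfl, ih t0 hlen]
      refine List.map_congr_left ?_
      intro j hj
      have hjlt : j < sl.length := List.mem_range.mp hj
      have hEl : sl.getD j "" = sl[j] := by
        simp [List.getD_eq_getElem?_getD, List.getElem?_eq_getElem hjlt]
      have hne : (sl[j] == name) = false := by
        refine beq_eq_false_iff_ne.mpr ?_
        intro hc
        exact hnm (hc ▸ List.getElem_mem hjlt)
      rw [hEl, List.contains_cons, hne]
      simp

theorem scan_eq (P : String → Bool) :
    ∀ (sl : List String),
      (match PySem.List.index? (sl.map P) false with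
       | some i => PySem.List.pyGetD sl (i : Int) ""
       | none => "")
        = (sl.find? (fun c => !(P c))).getD "" := by
  intro sl
  induction sl with
  | nil => rfl
  | cons s t ih =>
    show (match List.idxOf? false (P s :: t.map P) with
          | some i => PySem.List.pyGetD (s :: t) (i : Int) ""
          | none => "") = _
    rw [List.idxOf?_cons]
    cases hp : P s
    · rw [if_pos (by simp)]
      rw [List.find?_cons_of_pos (by simp [hp]), Option.getD_some]
      simp [PySem.List.pyGetD]
    · rw [if_neg (by simp), List.find?_cons_of_neg (by simp [hp]), ← ih]
      show (match Option.map (fun x : Nat => x + 1) (List.idxOf? false (t.map P)) with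
            | some i => PySem.List.pyGetD (s :: t) ((i : Nat) : Int) ""
            | none => "")
          = (match List.idxOf? false (t.map P) with
            | some i => PySem.List.pyGetD t ((i : Nat) : Int) ""
            | none => "")
      cases hk : List.idxOf? false (t.map P) with
      | some k =>
        simp only [Option.map_some]
        rw [PySem.List.pyGetD_natCast, PySem.List.pyGetD_natCast, List.getD_cons_succ]
      | none => rfl

theorem map_range_getD (existing sl : List String) :
    (List.range sl.length).map (fun j => existing.contains (sl.getD j ""))
      = sl.map (fun s => existing.contains s) := by
  refine List.ext_getElem (by simp) ?_
  intro j h1 h2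
  have hj : j < sl.length := by simpa using h2
  simp [List.getD_eq_getElem?_getD, List.getElem?_eq_getElem hj]

theorem B_eq_findD (base : String) (existing : List String) :
    generate_copy_name_py_alt base existing =
      ((slotsL base existing.length).find? (fun c => !(existing.contains c))).getD "" := by
  have hsl : (base :: copieTag base ::
      (PySem.List.pyRange 2 ((existing.length : Int) + 3) 1).map (fun i => copieNum base i))
      = slotsL base existing.length := by
    rw [pyRange_two, List.map_map]
    rfl
  unfold generate_copy_name_py_alt
  simp only [hsl]
  have hidx : ∀ name,
      ((PySem.List.enumerate (slotsL base existing.length)).foldl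
        (fun d p => d.insert p.2 p.1) PySem.Dict.empty).get? name
      = match List.idxOf? name (slotsL base existing.length) with
        | some k => some ((k : Int))
        | none => none := by
    intro name
    rw [get_build _ (slotsL_nodup base existing.length) 0 _ name]
    cases List.idxOf? name (slotsL base existing.length) <;>
      simp [PySem.Dict.get?_empty]
  rw [mark_fold (slotsL base existing.length) (slotsL_nodup base existing.length) _ hidx
      existing (List.replicate (slotsL base existing.length).length false) (by simp)]
  have hrep : (List.range (slotsL base existing.length).length).map
      (fun j => (List.replicate (slotsL base existing.length).length false).getD j false
        || existing.contains ((slotsL base existing.length).getD j ""))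
      = (List.range (slotsL base existing.length).length).map
          (fun j => existing.contains ((slotsL base existing.length).getD j "")) := by
    refine List.map_congr_left ?_
    intro j hj
    have : (List.replicate (slotsL base existing.length).length false).getD j false = false := by
      simp [List.getD_eq_getElem?_getD, List.getElem?_replicate]
      split_ifs <;> rfl
    rw [this, Bool.false_or]
  rw [hrep, map_range_getD]
  exact scan_eq (fun s => existing.contains s) (slotsL base existing.length)


-- ===== VERDICT (by name: the statement is the Claim_ definition above) =====
theorem generate_copy_name_py_spec : Claim_equal_generate_copy_name_py := by
  intro base existing _
  unfold Spec_generate_copy_name_py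
  rw [A_eq_findD base existing, B_eq_findD base existing]
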